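-- pv_equiv track=rewrite | github.com/assafelovic/gpt-researcher | gpt_researcher/skills/deep_research.py | trim_context_to_word_limit
-- ===== SOURCE A (Python) =====
-- MAX_CONTEXT_WORDS = 25000
--
-- def count_words(text: str) -> int:
--     """Count words in a text string."""
--     return len(text.split())
--
-- def trim_context_to_word_limit(
--     context_list: list[str],
--     max_words: int = MAX_CONTEXT_WORDS,
-- ) -> list[str]:
--     """Trim context list to stay within word limit while preserving most recent/relevant items."""
--     total_words: int = 0
--     trimmed_context: list[str] = []
--
--     # Process in reverse to keep most recent items
--     for item in reversed(context_list):
--         words: int = count_words(item)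
--         if total_words + words <= max_words:
--             trimmed_context.insert(
--                 0, item
--             )  # Insert at start to maintain original order
--             total_words += words
--         else:
--             break
--
--     return trimmed_context
-- ===== SOURCE B (Python) =====
-- MAX_CONTEXT_WORDS = 25000
--
-- def trim_context_to_word_limit(context_list, max_words=MAX_CONTEXT_WORDS):
--     """Keep the longest suffix whose cumulative word count fits, via prefix sums and one slice."""
--     # cumulative word counts over the items taken back-to-front:
--     # sums[k-1] = total words in the last k items
--     sums = []
--     running = 0
--     for item in reversed(context_list):
--         running += len(item.split())
--         sums.append(running)
--     # boundary: number of trailing items before the first cumulative sum over the limit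
--     keep = 0
--     while keep < len(sums) and sums[keep] <= max_words:
--         keep += 1
--     return context_list[len(context_list) - keep:]
-- ===== Notes on version B (the rewrite author's own statement) =====
-- stated objective: faster
-- what changed: B precomputes the reversed cumulative word sums, scans them once for the cutoff index, and returns a single slice, instead of A's greedy loop that front-inserts items one by one (insert(0,...) is O(n) per accepted item).
import Mathlib
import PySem

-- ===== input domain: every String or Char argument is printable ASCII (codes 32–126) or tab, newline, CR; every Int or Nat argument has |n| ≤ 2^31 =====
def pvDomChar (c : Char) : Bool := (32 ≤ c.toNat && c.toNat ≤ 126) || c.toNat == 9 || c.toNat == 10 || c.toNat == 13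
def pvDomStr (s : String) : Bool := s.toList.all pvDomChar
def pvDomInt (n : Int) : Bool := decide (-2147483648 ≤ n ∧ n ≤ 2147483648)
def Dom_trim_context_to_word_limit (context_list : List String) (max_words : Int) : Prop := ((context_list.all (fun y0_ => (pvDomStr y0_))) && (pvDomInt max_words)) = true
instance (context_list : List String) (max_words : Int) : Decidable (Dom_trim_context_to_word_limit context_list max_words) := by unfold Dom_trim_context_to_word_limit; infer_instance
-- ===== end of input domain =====

-- ===== PORT A =====
-- B replaces A's greedy front-insert loop by reversed cumulative sums, a boundary scan and one slice (alternative decomposition).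
-- count_words(text) = len(text.split())
def pvCountWords (text : String) : Int := ((PySem.Str.split₀ text).length : Int)

-- the 'for item in reversed(context_list)' loop with its break and insert(0, item)
def pvTrimGoA (max_words : Int) : List String → Int → List String → List String
  | [], _, trimmed => trimmed
  | item :: rest, total, trimmed =>
      let words : Int := pvCountWords item
      if total + words ≤ max_words then
        pvTrimGoA max_words rest (total + words) (item :: trimmed)
      else
        trimmed

def trim_context_to_word_limit (context_list : List String) (max_words : Int) : List String :=
  pvTrimGoA max_words context_list.reverse 0 []

-- ===== PORT B =====
-- first loop of Source B: reversed cumulative word sums (sums[k-1] = words in the last k items)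
def pvAltSums : List String → Int → List Int
  | [], _ => []
  | item :: rest, running =>
      let running' := running + pvCountWords item
      running' :: pvAltSums rest running'

-- second loop of Source B: while keep < len(sums) and sums[keep] <= max_words: keep += 1
def pvAltKeep (max_words : Int) : List Int → Nat
  | [] => 0
  | s :: rest => if s ≤ max_words then 1 + pvAltKeep max_words rest else 0

def trim_context_to_word_limit_alt (context_list : List String) (max_words : Int) : List String :=
  let sums := pvAltSums context_list.reverse 0
  let keep := pvAltKeep max_words sums
  PySem.List.slice context_list (some ((context_list.length : Int) - (keep : Int))) none

-- ===== PRECONDITION & SPEC =====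
def Spec_trim_context_to_word_limit (context_list : List String) (max_words : Int) (out : List String) : Prop := out = trim_context_to_word_limit_alt context_list max_words
instance (context_list : List String) (max_words : Int) (out : List String) : Decidable (Spec_trim_context_to_word_limit context_list max_words out) := by unfold Spec_trim_context_to_word_limit; infer_instance

-- ===== CLAIM (what is proved, stated in full; the proofs are below) =====
def Claim_equal_trim_context_to_word_limit : Prop := ∀ (context_list : List String) (max_words : Int), Dom_trim_context_to_word_limit context_list max_words → Spec_trim_context_to_word_limit context_list max_words (trim_context_to_word_limit context_list max_words)

-- ===== LEMMAS AND PROOFS =====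

-- the sequence of items (in reversed order) that A's greedy loop accepts
def pvGrab (mw : Int) : List String → Int → List String
  | [], _ => []
  | x :: rest, total =>
      if total + pvCountWords x ≤ mw then x :: pvGrab mw rest (total + pvCountWords x) else []

theorem pvTrimGoA_eq (mw : Int) :
    ∀ (l : List String) (total : Int) (acc : List String),
      pvTrimGoA mw l total acc = (pvGrab mw l total).reverse ++ acc := by
  intro l
  induction l with
  | nil => intro total acc; simp [pvTrimGoA, pvGrab]
  | cons x rest ih =>
      intro total acc
      simp only [pvTrimGoA, pvGrab]
      split_ifs with h
      · rw [ih]; simp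
      · simp

theorem pvAltKeep_eq (mw : Int) :
    ∀ (l : List String) (r : Int),
      pvAltKeep mw (pvAltSums l r) = (pvGrab mw l r).length := by
  intro l
  induction l with
  | nil => intro r; simp [pvAltSums, pvAltKeep, pvGrab]
  | cons x rest ih =>
      intro r
      simp only [pvAltSums, pvAltKeep, pvGrab]
      split_ifs with h
      · simp [ih]; omega
      · simp

theorem pvGrab_take (mw : Int) :
    ∀ (l : List String) (t : Int),
      pvGrab mw l t = l.take (pvGrab mw l t).length := by
  intro l
  induction l with
  | nil => intro t; simp [pvGrab]
  | cons x rest ih =>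
      intro t
      simp only [pvGrab]
      split_ifs with h
      · simp only [List.length_cons, List.take_succ_cons, List.cons.injEq, true_and]
        exact ih _
      · simp

-- ===== VERDICT (by name: the statement is the Claim_ definition above) =====
theorem trim_context_to_word_limit_spec : Claim_equal_trim_context_to_word_limit := by
  intro cl mw _
  unfold Spec_trim_context_to_word_limit
  simp only [trim_context_to_word_limit, trim_context_to_word_limit_alt]
  rw [pvTrimGoA_eq, pvAltKeep_eq, List.append_nil]
  set k := (pvGrab mw cl.reverse 0).length with hk
  have hkle : k ≤ cl.length := by
    have h := congrArg List.length (pvGrab_take mw cl.reverse 0)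
    rw [List.length_take, List.length_reverse] at h
    omega
  have hcast : ((cl.length : Int) - (k : Int)) = ((cl.length - k : Nat) : Int) :=
    (Nat.cast_sub hkle).symm
  rw [hcast, PySem.List.slice_from_natCast]
  have hg : pvGrab mw cl.reverse 0 = cl.reverse.take k := pvGrab_take mw cl.reverse 0
  rw [hg, List.take_reverse, List.reverse_reverse]
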